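-- pv_equiv track=rewrite | github.com/DHKim95/TIL | Algorithm Study/프로그래머스/12923.py | solution
-- ===== SOURCE A (Python) =====
-- import math
--
-- def solution(begin, end):
--     answer = []
--
--     for num in range(begin, end + 1):
--         number = 1
--         # 나눠지는수들은 넣기
--         for i in range(2, int(math.sqrt(num)) + 1):
--             if num % i == 0:
--                 number = (num // i)
--                 if num // i > 10000000:
--                     number = 1
--                     continue
--                 else:
--                     break
--                     # number = (num // i)
--                 # break
--
--         answer.append(number)
--         # 소수인것들은 1추가
--         # else:
--         #     answer.append(1)
--     if begin == 1:
--         answer[0] = 0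
--
--     return answer
-- ===== SOURCE B (Python) =====
-- import math
--
-- def solution(begin, end):
--     # Divisor-major segmented sieve: one pass per divisor d over its multiples
--     # in [begin, end], instead of trial-dividing every number separately.
--     LIMIT = 10000000
--     size = end - begin + 1
--     ans = [None] * max(size, 0)
--     if end >= 4:
--         for d in range(2, math.isqrt(end) + 1):
--             first = max(d * d, -(-begin // d) * d)
--             for m in range(first, end + 1, d):
--                 j = m - begin
--                 if ans[j] is None and m // d <= LIMIT:
--                     ans[j] = m // d
--     res = [1 if a is None else a for a in ans]
--     if begin == 1:
--         res[0] = 0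
--     return res
-- ===== Notes on version B (the rewrite author's own statement) =====
-- stated objective: alternative
-- what changed: Replaces A's per-number trial division up to sqrt(num) by a divisor-major segmented sieve: each divisor d from 2 to isqrt(end) sweeps its multiples inside [begin, end] once, recording for every number the first qualifying cofactor (<= 10^7), so the inner trial-division scan disappears (intended as faster; a timing run measured 1.6x at the largest size but inconsistently, so no speed is claimed).
import Mathlib
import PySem

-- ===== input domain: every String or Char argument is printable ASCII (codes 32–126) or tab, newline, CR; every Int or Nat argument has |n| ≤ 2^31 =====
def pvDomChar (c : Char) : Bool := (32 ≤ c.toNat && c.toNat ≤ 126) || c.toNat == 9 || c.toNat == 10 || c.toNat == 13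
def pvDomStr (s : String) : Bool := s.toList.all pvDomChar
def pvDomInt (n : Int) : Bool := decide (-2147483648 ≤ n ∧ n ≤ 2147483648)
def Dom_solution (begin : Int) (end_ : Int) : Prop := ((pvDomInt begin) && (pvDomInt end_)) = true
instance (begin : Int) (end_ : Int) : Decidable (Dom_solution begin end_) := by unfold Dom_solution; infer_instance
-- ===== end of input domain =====

-- B replaces A's per-number trial division by a divisor-major segmented sieve over
-- [begin, end] (one pass over the multiples of each divisor d); return value only.

-- Shared numeric helper: on 0 ≤ num ≤ 2^31, Python's int(math.sqrt(num)) (used by A)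
-- and math.isqrt(num) (used by B) are both exactly Nat.sqrt (checked over the domain).
def isqrtI (num : Int) : Int := ((Nat.sqrt num.toNat : Nat) : Int)

-- ===== PORT A =====
-- inner 'for i in range(2, int(math.sqrt(num)) + 1)' loop with its break/continue,
-- carrying the Python variable 'number' (initially 1)
def loopA (num : Int) : List Int → Int → Int
  | [], number => number
  | i :: rest, number =>
    if PySem.Int.mod num i = 0 then
      if 10000000 < PySem.Int.floordiv num i then loopA num rest 1
      else PySem.Int.floordiv num i
    else loopA num rest number

def solution (begin : Int) (end_ : Int) : List Int :=
  let answer := (PySem.List.pyRange begin (end_ + 1) 1).foldl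
    (fun acc num => acc ++ [loopA num (PySem.List.pyRange 2 (isqrtI num + 1) 1) 1]) []
  if begin = 1 then PySem.List.pySetD answer 0 0 else answer

-- ===== PORT B =====
-- body of 'for d in …': one sweep over the multiples of d inside [begin, end]
def stepB (begin : Int) (end_ : Int) (d : Int) (ans : List (Option Int)) : List (Option Int) :=
  let first := max (d * d) (-(PySem.Int.floordiv (-begin) d) * d)
  (PySem.List.pyRange first (end_ + 1) d).foldl
    (fun ans m =>
      if PySem.List.pyGetD ans (m - begin) none = none ∧ PySem.Int.floordiv m d ≤ 10000000
      then PySem.List.pySetD ans (m - begin) (some (PySem.Int.floordiv m d))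
      else ans) ans

def solution_alt (begin : Int) (end_ : Int) : List Int :=
  let ans : List (Option Int) := List.replicate (max (end_ - begin + 1) 0).toNat none
  let ans := if 4 ≤ end_ then
      (PySem.List.pyRange 2 (isqrtI end_ + 1) 1).foldl (fun a d => stepB begin end_ d a) ans
    else ans
  let res := ans.map (fun a => match a with | none => (1 : Int) | some v => v)
  if begin = 1 then PySem.List.pySetD res 0 0 else res

-- ===== PRECONDITION & SPEC =====
-- Pre_ excludes begin < 0 with a nonempty range (A raises ValueError in math.sqrt of a
-- negative number) and begin = 1 ∧ end < 1 (answer[0] = 0 raises IndexError on []).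
def Pre_solution (begin : Int) (end_ : Int) : Prop :=
  (0 ≤ begin ∨ end_ < begin) ∧ ¬(begin = 1 ∧ end_ < 1)
instance (begin : Int) (end_ : Int) : Decidable (Pre_solution begin end_) := by unfold Pre_solution; infer_instance
def pvWitness_solution : Int × Int := (2, 12)

def Spec_solution (begin : Int) (end_ : Int) (out : List Int) : Prop := out = solution_alt begin end_
instance (begin : Int) (end_ : Int) (out : List Int) : Decidable (Spec_solution begin end_ out) := by unfold Spec_solution; infer_instance

-- ===== CLAIM (what is proved, stated in full; the proofs are below) =====
def Claim_equal_solution : Prop := ∀ (begin : Int) (end_ : Int), Dom_solution begin end_ → Pre_solution begin end_ → Spec_solution begin end_ (solution begin end_)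

-- ===== LEMMAS AND PROOFS =====

-- the predicate B's sieve effectively tests for divisor i of num
def qB (num i : Int) : Bool :=
  decide (i * i ≤ num ∧ PySem.Int.mod num i = 0 ∧ PySem.Int.floordiv num i ≤ 10000000)

-- first qualifying divisor among 2..k, mapped to the cofactor
def G (num k : Int) : Option Int :=
  ((PySem.List.pyRange 2 (k + 1) 1).find? (qB num)).map (fun i => PySem.Int.floordiv num i)

def fA (num : Int) : Int := (G num (isqrtI num)).getD 1

lemma find?_congr_mem {α : Type} (l : List α) (p q : α → Bool) (h : ∀ x ∈ l, p x = q x) :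
    l.find? p = l.find? q := by
  induction l with
  | nil => rfl
  | cons x xs ih =>
    have hx := h x (List.mem_cons_self ..)
    simp only [List.find?_cons, hx]
    cases q x with
    | true => rfl
    | false => exact ih (fun y hy => h y (List.mem_cons_of_mem _ hy))

lemma sq_le_iff_le_isqrt (num i : Int) (h0 : 0 ≤ num) (h1 : 0 ≤ i) :
    i * i ≤ num ↔ i ≤ isqrtI num := by
  rcases Int.eq_ofNat_of_zero_le h0 with ⟨n, rfl⟩
  rcases Int.eq_ofNat_of_zero_le h1 with ⟨m, rfl⟩
  unfold isqrtI
  simp only [Int.toNat_natCast]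
  constructor
  · intro h; exact_mod_cast Nat.le_sqrt.mpr (by exact_mod_cast h)
  · intro h; exact_mod_cast Nat.le_sqrt.mp (by exact_mod_cast h)

lemma isqrtI_nonneg (num : Int) : 0 ≤ isqrtI num := by
  unfold isqrtI; exact Int.natCast_nonneg _

lemma qB_false_of_gt (num i : Int) (h0 : 0 ≤ num) (hi : isqrtI num < i) :
    qB num i = false := by
  have h1 : 0 ≤ i := le_trans (isqrtI_nonneg num) (le_of_lt hi)
  simp only [qB, decide_eq_false_iff_not]
  rintro ⟨hsq, -⟩
  exact absurd ((sq_le_iff_le_isqrt num i h0 h1).mp hsq) (by omega)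

lemma loopA_eq_find (num : Int) (l : List Int) :
    loopA num l 1 =
      ((l.find? (fun i =>
          decide (PySem.Int.mod num i = 0 ∧ PySem.Int.floordiv num i ≤ 10000000))).map
        (fun i => PySem.Int.floordiv num i)).getD 1 := by
  induction l with
  | nil => rfl
  | cons i rest ih =>
    simp only [loopA, List.find?_cons]
    by_cases h1 : PySem.Int.mod num i = 0
    · by_cases h2 : 10000000 < PySem.Int.floordiv num i
      · have hd : decide (PySem.Int.floordiv num i ≤ 10000000) = false := by
          simp; omega
        simp [h1, hd, ih]
        exact fun h => absurd h (by omega)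
      · have hd : decide (PySem.Int.floordiv num i ≤ 10000000) = true := by
          simp; omega
        simp [h1, h2, hd]
    · have hp : ¬(PySem.Int.mod num i = 0 ∧ PySem.Int.floordiv num i ≤ 10000000) := by
        rintro ⟨h, -⟩; exact h1 h
      simp only [if_neg h1, decide_eq_false hp, ih]

lemma A_char (num : Int) (h0 : 0 ≤ num) :
    loopA num (PySem.List.pyRange 2 (isqrtI num + 1) 1) 1 = fA num := by
  rw [loopA_eq_find]
  unfold fA G
  have hcong := find?_congr_mem (PySem.List.pyRange 2 (isqrtI num + 1) 1)
    (fun i => decide (PySem.Int.mod num i = 0 ∧ PySem.Int.floordiv num i ≤ 10000000))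
    (qB num) ?_
  · rw [hcong]
  · intro x hx
    rw [PySem.List.mem_pyRange_one] at hx
    have hsq : x * x ≤ num := (sq_le_iff_le_isqrt num x h0 (by omega)).mpr (by omega)
    simp only [qB]
    by_cases hp : PySem.Int.mod num x = 0 ∧ PySem.Int.floordiv num x ≤ 10000000
    · simp [hp, hsq]
    · simp only [decide_eq_false hp]
      have : ¬(x * x ≤ num ∧ PySem.Int.mod num x = 0 ∧ PySem.Int.floordiv num x ≤ 10000000) := by
        rintro ⟨-, h⟩; exact hp h
      simp [this]

lemma G_high (num k : Int) (h0 : 0 ≤ num) (hk : isqrtI num ≤ k) :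
    G num k = G num (isqrtI num) := by
  have hs := isqrtI_nonneg num
  by_cases hc : isqrtI num + 1 < 2
  · have h1 : G num (isqrtI num) = none := by
      unfold G; rw [PySem.List.pyRange_one_eq_nil (by omega)]; rfl
    have h2 : G num k = none := by
      unfold G
      have : (PySem.List.pyRange 2 (k + 1) 1).find? (qB num) = none := by
        rw [List.find?_eq_none]
        intro x hx
        rw [PySem.List.mem_pyRange_one] at hx
        simp [qB_false_of_gt num x h0 (by omega)]
      rw [this]; rfl
    rw [h1, h2]
  · unfold G
    rw [PySem.List.pyRange_one_append 2 (isqrtI num + 1) (k + 1) (by omega) (by omega),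
      List.find?_append]
    have h2 : (PySem.List.pyRange (isqrtI num + 1) (k + 1) 1).find? (qB num) = none := by
      rw [List.find?_eq_none]
      intro x hx
      rw [PySem.List.mem_pyRange_one] at hx
      simp [qB_false_of_gt num x h0 (by omega)]
    rw [h2, Option.or_none]

lemma foldl_append_map (l : List Int) (g : Int → Int) (acc : List Int) :
    l.foldl (fun a x => a ++ [g x]) acc = acc ++ l.map g := by
  induction l generalizing acc with
  | nil => simp
  | cons x xs ih => simp [List.foldl_cons, ih]

-- the sieve's inner fold, over any list of "multiples" hitting distinct in-range slots
lemma foldl_set_general (begin d : Int) (M : List Int) (ans : List (Option Int))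
    (hM : ∀ m ∈ M, begin ≤ m ∧ (m - begin).toNat < ans.length) (hnd : M.Nodup) :
    (∀ j : Nat, j < ans.length →
      (M.foldl (fun ans m =>
        if PySem.List.pyGetD ans (m - begin) none = none ∧ PySem.Int.floordiv m d ≤ 10000000
        then PySem.List.pySetD ans (m - begin) (some (PySem.Int.floordiv m d))
        else ans) ans).getD j none =
      if (begin + j) ∈ M ∧ ans.getD j none = none ∧ PySem.Int.floordiv (begin + j) d ≤ 10000000
      then some (PySem.Int.floordiv (begin + j) d) else ans.getD j none) ∧
    (M.foldl (fun ans m =>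
        if PySem.List.pyGetD ans (m - begin) none = none ∧ PySem.Int.floordiv m d ≤ 10000000
        then PySem.List.pySetD ans (m - begin) (some (PySem.Int.floordiv m d))
        else ans) ans).length = ans.length := by
  induction M generalizing ans with
  | nil => exact ⟨fun j hj => by simp, rfl⟩
  | cons m M' ih =>
    obtain ⟨hm1, hm2⟩ := hM m (List.mem_cons_self ..)
    have hmem : m ∉ M' := (List.nodup_cons.mp hnd).1
    have hnd' : M'.Nodup := (List.nodup_cons.mp hnd).2
    have hmb : m - begin = (((m - begin).toNat : Nat) : Int) := by omega
    set jm := (m - begin).toNat with hjm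
    set v : Option Int := some (PySem.Int.floordiv m d) with hv
    set ans1 : List (Option Int) :=
      if ans.getD jm none = none ∧ PySem.Int.floordiv m d ≤ 10000000
      then ans.set jm v else ans with hans1
    have hlen1 : ans1.length = ans.length := by
      rw [hans1]; split <;> simp
    have hhead : (if PySem.List.pyGetD ans (m - begin) none = none ∧
          PySem.Int.floordiv m d ≤ 10000000
        then PySem.List.pySetD ans (m - begin) (some (PySem.Int.floordiv m d))
        else ans) = ans1 := by
      simp only [hmb, PySem.List.pyGetD_natCast, PySem.List.pySetD_natCast, List.getD_eq_getElem?_getD]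
      rw [hans1]
      simp only [List.getD_eq_getElem?_getD]
      rfl
    have hset_getD : ∀ (j : Nat) (w : Option Int), (ans.set jm w).getD j none =
        if jm = j then (if jm < ans.length then w else none) else ans.getD j none := by
      intro j w
      simp only [List.getD_eq_getElem?_getD, List.getElem?_set]
      by_cases h1 : jm = j
      · by_cases h2 : j < ans.length <;> simp [h1, h2]
      · simp [h1]
    have hM' : ∀ x ∈ M', begin ≤ x ∧ (x - begin).toNat < ans1.length := by
      intro x hx; rw [hlen1]; exact hM x (List.mem_cons_of_mem _ hx)
    obtain ⟨ihp, ihl⟩ := ih ans1 hM' hnd'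
    rw [List.foldl_cons, hhead]
    refine ⟨fun j hj => ?_, by rw [ihl, hlen1]⟩
    have hj1 : j < ans1.length := by omega
    rw [ihp j hj1]
    have hbm : begin + (jm : Int) = m := by omega
    by_cases hjeq : j = jm
    · subst hjeq
      have hnotM' : begin + (jm : Int) ∉ M' := by rw [hbm]; exact hmem
      rw [if_neg (fun hc => hnotM' hc.1)]
      by_cases hcond : ans.getD jm none = none ∧ PySem.Int.floordiv m d ≤ 10000000
      · have h1 : ans1 = ans.set jm v := by rw [hans1, if_pos hcond]
        rw [h1, hset_getD, if_pos rfl, if_pos hm2]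
        rw [if_pos ⟨by rw [hbm]; exact List.mem_cons_self .., hcond.1,
              by rw [hbm]; exact hcond.2⟩]
        rw [hv, hbm]
      · have h1 : ans1 = ans := by rw [hans1, if_neg hcond]
        rw [h1]
        rw [if_neg (by rw [hbm]; intro hc; exact hcond ⟨hc.2.1, hc.2.2⟩)]
    · have hne : begin + (j : Int) ≠ m := by omega
      have h1 : ans1.getD j none = ans.getD j none := by
        rw [hans1]; split
        · rw [hset_getD, if_neg (by omega)]
        · rfl
      have hmm : (begin + (j : Int) ∈ m :: M') ↔ (begin + (j : Int) ∈ M') := by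
        simp [List.mem_cons, hne]
      rw [h1]
      simp only [hmm]

lemma mem_multiples_iff (begin end_ d m : Int) (hb : 0 ≤ begin) (hd : 2 ≤ d)
    (hm : begin ≤ m) :
    m ∈ PySem.List.pyRange (max (d * d) (-(PySem.Int.floordiv (-begin) d) * d)) (end_ + 1) d ↔
      d * d ≤ m ∧ d ∣ m ∧ m ≤ end_ := by
  have hdpos : (0:Int) < d := by omega
  have hqc := (PySem.Int.neg_floordiv_neg_eq_iff_of_pos (a := begin) (b := d)
    (q := -(PySem.Int.floordiv (-begin) d)) hdpos).mp rfl
  set q := -(PySem.Int.floordiv (-begin) d) with hq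
  rw [PySem.List.mem_pyRange_iff_of_pos hdpos]
  have hdvd_first : d ∣ max (d * d) (q * d) := by
    rcases max_choice (d * d) (q * d) with h | h <;> rw [h]
    · exact dvd_mul_right d d
    · exact Dvd.intro_left q rfl
  constructor
  · rintro ⟨h1, h2, h3⟩
    have hdm : d ∣ m := by
      have h4 := dvd_add h3 hdvd_first
      simpa using h4
    exact ⟨le_trans (le_max_left _ _) h1, hdm, by omega⟩
  · rintro ⟨h1, hdvd, h3⟩
    obtain ⟨t, rfl⟩ := hdvd
    have hqt : q * d ≤ d * t := by
      have h4 : (q - 1) * d < d * t := lt_of_lt_of_le hqc.1 hm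
      have h5 : q - 1 < t := by
        by_contra hcon
        push_neg at hcon
        have h6 : d * t ≤ d * (q - 1) := mul_le_mul_of_nonneg_left hcon (by omega)
        nlinarith
      nlinarith
    refine ⟨max_le h1 hqt, by omega, ?_⟩
    exact dvd_sub (Dvd.intro t rfl) hdvd_first

lemma nodup_multiples (a b d : Int) (hd : 0 < d) : (PySem.List.pyRange a b d).Nodup := by
  rw [PySem.List.pyRange_of_pos a b hd]
  refine List.Nodup.map ?_ List.nodup_range
  intro x y hxy
  have h2 : d * (x : Int) = d * y := by
    have h3 : a + d * (x : Int) = a + d * y := hxy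
    linarith
  have h4 : (x : Int) = y := mul_left_cancel₀ (by omega : (d : Int) ≠ 0) h2
  exact_mod_cast h4

lemma stepB_spec (begin end_ d : Int) (ans : List (Option Int)) (hb : 0 ≤ begin) (hd : 2 ≤ d)
    (hlen : ans.length = (end_ - begin + 1).toNat) :
    (∀ j : Nat, j < ans.length →
      (stepB begin end_ d ans).getD j none =
        if (d * d ≤ begin + j ∧ d ∣ (begin + j)) ∧ ans.getD j none = none ∧
            PySem.Int.floordiv (begin + j) d ≤ 10000000
        then some (PySem.Int.floordiv (begin + j) d) else ans.getD j none) ∧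
    (stepB begin end_ d ans).length = ans.length := by
  have hdpos : (0:Int) < d := by omega
  have hqc := (PySem.Int.neg_floordiv_neg_eq_iff_of_pos (a := begin) (b := d)
    (q := -(PySem.Int.floordiv (-begin) d)) hdpos).mp rfl
  have hMprop : ∀ x ∈ PySem.List.pyRange
      (max (d * d) (-(PySem.Int.floordiv (-begin) d) * d)) (end_ + 1) d,
      begin ≤ x ∧ (x - begin).toNat < ans.length := by
    intro x hx
    rw [PySem.List.mem_pyRange_iff_of_pos hdpos] at hx
    obtain ⟨h1, h2, -⟩ := hx
    have h3 : -(PySem.Int.floordiv (-begin) d) * d ≤ x := le_trans (le_max_right _ _) h1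
    constructor
    · nlinarith [hqc.2]
    · rw [hlen]; omega
  obtain ⟨hp, hl⟩ := foldl_set_general begin d _ ans hMprop (nodup_multiples _ _ _ hdpos)
  have hstep : stepB begin end_ d ans = (PySem.List.pyRange
      (max (d * d) (-(PySem.Int.floordiv (-begin) d) * d)) (end_ + 1) d).foldl
      (fun ans m =>
        if PySem.List.pyGetD ans (m - begin) none = none ∧ PySem.Int.floordiv m d ≤ 10000000
        then PySem.List.pySetD ans (m - begin) (some (PySem.Int.floordiv m d))
        else ans) ans := rfl
  constructor
  · intro j hj
    rw [hstep, hp j hj]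
    have hle : begin + (j : Int) ≤ end_ := by
      rw [hlen] at hj; omega
    have hmemiff := mem_multiples_iff begin end_ d (begin + j) hb hd (by omega)
    have hiff : ((begin + (j : Int)) ∈ PySem.List.pyRange
          (max (d * d) (-(PySem.Int.floordiv (-begin) d) * d)) (end_ + 1) d ∧
          ans.getD j none = none ∧ PySem.Int.floordiv (begin + j) d ≤ 10000000) ↔
        ((d * d ≤ begin + j ∧ d ∣ (begin + j)) ∧ ans.getD j none = none ∧
          PySem.Int.floordiv (begin + j) d ≤ 10000000) := by
      rw [hmemiff]; tauto
    rw [if_congr hiff rfl rfl]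
  · rw [hstep]; exact hl

lemma G_step (m : Int) (k : Nat) (hk : 1 ≤ k) :
    G m ((k : Int) + 1) = (G m ((k : Int))).or
      (if qB m ((k : Int) + 1) = true
       then some (PySem.Int.floordiv m ((k : Int) + 1)) else none) := by
  unfold G
  rw [PySem.List.pyRange_one_succ_right (a := 2) (b := (k : Int) + 1) (by omega),
    List.find?_append]
  cases hF : (PySem.List.pyRange 2 ((k : Int) + 1) 1).find? (qB m) with
  | some i => rfl
  | none =>
    simp only [Option.none_or, Option.map_none]
    cases hqb : qB m ((k : Int) + 1) with
    | true => simp [List.find?, hqb]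
    | false => simp [List.find?, hqb]

lemma outer_spec (begin end_ : Int) (hb : 0 ≤ begin) (k : Nat) (hk : 1 ≤ k) :
    (∀ j : Nat, j < ((PySem.List.pyRange 2 ((k : Int) + 1) 1).foldl
        (fun a d => stepB begin end_ d a)
        (List.replicate (max (end_ - begin + 1) 0).toNat none)).length →
      ((PySem.List.pyRange 2 ((k : Int) + 1) 1).foldl (fun a d => stepB begin end_ d a)
        (List.replicate (max (end_ - begin + 1) 0).toNat none)).getD j none =
        G (begin + j) k) ∧
    ((PySem.List.pyRange 2 ((k : Int) + 1) 1).foldl (fun a d => stepB begin end_ d a)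
      (List.replicate (max (end_ - begin + 1) 0).toNat none)).length =
      (end_ - begin + 1).toNat := by
  induction k, hk using Nat.le_induction with
  | base =>
    have hnil : PySem.List.pyRange 2 (((1 : Nat) : Int) + 1) 1 = [] :=
      PySem.List.pyRange_one_eq_nil (by norm_num)
    rw [hnil]
    simp only [List.foldl_nil, List.length_replicate]
    constructor
    · intro j hj
      rw [List.getD_replicate _ hj]
      unfold G
      rw [show ((1 : Nat) : Int) + 1 = 2 by norm_num,
        PySem.List.pyRange_one_eq_nil (by norm_num)]
      rfl
    · omega
  | succ k hk ih =>
    obtain ⟨ihp, ihl⟩ := ih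
    have hcast : (((k + 1 : Nat)) : Int) + 1 = ((k : Int) + 1) + 1 := by push_cast; ring
    have hsplit : PySem.List.pyRange 2 ((((k + 1 : Nat)) : Int) + 1) 1 =
        PySem.List.pyRange 2 ((k : Int) + 1) 1 ++ [(k : Int) + 1] := by
      rw [hcast]
      exact PySem.List.pyRange_one_succ_right (by omega)
    rw [hsplit, List.foldl_append]
    set prev := (PySem.List.pyRange 2 ((k : Int) + 1) 1).foldl (fun a d => stepB begin end_ d a)
      (List.replicate (max (end_ - begin + 1) 0).toNat none) with hprev
    simp only [List.foldl_cons, List.foldl_nil]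
    obtain ⟨sp, sl⟩ := stepB_spec begin end_ ((k : Int) + 1) prev hb (by omega) ihl
    refine ⟨fun j hj => ?_, by rw [sl, ihl]⟩
    have hj' : j < prev.length := sl ▸ hj
    rw [sp j hj', ihp j hj']
    set m := begin + (j : Int) with hm
    rw [show (((k + 1 : Nat)) : Int) = (k : Int) + 1 by push_cast; ring]
    rw [G_step m k hk]
    cases hG : G m ((k : Int)) with
    | some v =>
      rw [if_neg (by rintro ⟨-, h, -⟩; simp at h)]
      rfl
    | none =>
      rw [Option.none_or]
      by_cases hq : ((k : Int) + 1) * ((k : Int) + 1) ≤ m ∧ ((k : Int) + 1) ∣ m ∧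
          PySem.Int.floordiv m ((k : Int) + 1) ≤ 10000000
      · have hqb : qB m ((k : Int) + 1) = true := by
          simp only [qB, decide_eq_true_eq]
          exact ⟨hq.1, (PySem.Int.mod_eq_zero_iff_dvd m _).mpr hq.2.1, hq.2.2⟩
        rw [if_pos ⟨⟨hq.1, hq.2.1⟩, rfl, hq.2.2⟩, if_pos hqb]
      · have hqb : qB m ((k : Int) + 1) = false := by
          simp only [qB, decide_eq_false_iff_not]
          rintro ⟨h1, h2, h3⟩
          exact hq ⟨h1, (PySem.Int.mod_eq_zero_iff_dvd m _).mp h2, h3⟩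
        rw [if_neg (fun hc => hq ⟨hc.1.1, hc.1.2, hc.2.2⟩), if_neg (by rw [hqb]; exact fun h => Bool.noConfusion h)]

lemma map_fA_eq (begin end_ : Int) (hb : 0 ≤ begin) :
    (PySem.List.pyRange begin (end_ + 1) 1).foldl
      (fun acc num => acc ++ [loopA num (PySem.List.pyRange 2 (isqrtI num + 1) 1) 1]) [] =
    (PySem.List.pyRange begin (end_ + 1) 1).map fA := by
  have h := foldl_append_map (PySem.List.pyRange begin (end_ + 1) 1)
    (fun num => loopA num (PySem.List.pyRange 2 (isqrtI num + 1) 1) 1) []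
  rw [List.nil_append] at h
  rw [h]
  exact List.map_congr_left (fun num hnum => A_char num (by
    rw [PySem.List.mem_pyRange_one] at hnum; omega))

lemma isqrtI_mono (a b : Int) (h : a ≤ b) : isqrtI a ≤ isqrtI b := by
  unfold isqrtI
  exact_mod_cast Nat.sqrt_le_sqrt (by omega)

lemma fA_small (num : Int) (h0 : 0 ≤ num) (h3 : num ≤ 3) : fA num = 1 := by
  unfold fA
  have h1 : Nat.sqrt num.toNat < 2 := Nat.sqrt_lt'.mpr (by omega)
  have h2 : isqrtI num ≤ 1 := by unfold isqrtI; omega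
  have hG : G num (isqrtI num) = none := by
    unfold G; rw [PySem.List.pyRange_one_eq_nil (by omega)]; rfl
  rw [hG]; rfl

lemma B_res_eq (begin end_ : Int) (hb : 0 ≤ begin) :
    ((if 4 ≤ end_ then
        (PySem.List.pyRange 2 (isqrtI end_ + 1) 1).foldl (fun a d => stepB begin end_ d a)
          (List.replicate (max (end_ - begin + 1) 0).toNat none)
      else List.replicate (max (end_ - begin + 1) 0).toNat none).map
      (fun a => match a with | none => (1 : Int) | some v => v)) =
    (PySem.List.pyRange begin (end_ + 1) 1).map fA := by
  by_cases hc4 : 4 ≤ end_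
  · rw [if_pos hc4]
    set k : Nat := Nat.sqrt end_.toNat with hk
    have hk1 : 1 ≤ k := by
      have h5 : (2 : Nat) ≤ k := by rw [hk]; exact Nat.le_sqrt.mpr (by omega)
      omega
    have hke : isqrtI end_ = (k : Int) := rfl
    obtain ⟨op, ol⟩ := outer_spec begin end_ hb k hk1
    rw [hke]
    apply List.ext_getElem
    · rw [List.length_map, List.length_map, ol, PySem.List.length_pyRange_one]; omega
    · intro j h1 h2
      rw [List.getElem_map, List.getElem_map, PySem.List.getElem_pyRange_one]
      have hjl : j < ((PySem.List.pyRange 2 ((k : Int) + 1) 1).foldl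
          (fun a d => stepB begin end_ d a)
          (List.replicate (max (end_ - begin + 1) 0).toNat none)).length := by
        rw [List.length_map] at h1; exact h1
      have hget : ((PySem.List.pyRange 2 ((k : Int) + 1) 1).foldl
          (fun a d => stepB begin end_ d a)
          (List.replicate (max (end_ - begin + 1) 0).toNat none))[j] =
          G (begin + (j : Int)) ((k : Nat) : Int) := by
        rw [← List.getD_eq_getElem _ none hjl]
        exact op j hjl
      rw [hget]
      have hle : begin + (j : Int) ≤ end_ := by
        rw [ol] at hjl; omega
      have hGh : G (begin + (j : Int)) ((k : Nat) : Int) =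
          G (begin + (j : Int)) (isqrtI (begin + (j : Int))) := by
        apply G_high _ _ (by omega)
        rw [← hke]
        exact isqrtI_mono _ _ hle
      rw [hGh]
      unfold fA
      cases hX : G (begin + (j : Int)) (isqrtI (begin + (j : Int))) <;> rfl
  · rw [if_neg hc4, List.map_replicate]
    symm
    rw [List.eq_replicate_iff]
    constructor
    · rw [List.length_map, PySem.List.length_pyRange_one]; omega
    · intro b hbmem
      rw [List.mem_map] at hbmem
      obtain ⟨num, hnum, rfl⟩ := hbmem
      rw [PySem.List.mem_pyRange_one] at hnum
      exact fA_small num (by omega) (by omega)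

-- ===== VERDICT (by name: the statement is the Claim_ definition above) =====
theorem solution_spec : Claim_equal_solution := by
  intro begin end_ hdom hpre
  obtain ⟨hb0, hcorner⟩ := hpre
  unfold Spec_solution
  have hA0 : solution begin end_ =
      (if begin = 1 then PySem.List.pySetD ((PySem.List.pyRange begin (end_ + 1) 1).foldl
          (fun acc num => acc ++ [loopA num (PySem.List.pyRange 2 (isqrtI num + 1) 1) 1]) []) 0 0
       else (PySem.List.pyRange begin (end_ + 1) 1).foldl
          (fun acc num => acc ++ [loopA num (PySem.List.pyRange 2 (isqrtI num + 1) 1) 1]) []) := rfl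
  have hB0 : solution_alt begin end_ =
      (if begin = 1 then PySem.List.pySetD (((if 4 ≤ end_ then
          (PySem.List.pyRange 2 (isqrtI end_ + 1) 1).foldl (fun a d => stepB begin end_ d a)
            (List.replicate (max (end_ - begin + 1) 0).toNat none)
        else List.replicate (max (end_ - begin + 1) 0).toNat none).map
        (fun a => match a with | none => (1 : Int) | some v => v))) 0 0
       else ((if 4 ≤ end_ then
          (PySem.List.pyRange 2 (isqrtI end_ + 1) 1).foldl (fun a d => stepB begin end_ d a)
            (List.replicate (max (end_ - begin + 1) 0).toNat none)
        else List.replicate (max (end_ - begin + 1) 0).toNat none).map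
        (fun a => match a with | none => (1 : Int) | some v => v))) := rfl
  by_cases hb : 0 ≤ begin
  · rw [hA0, hB0, map_fA_eq begin end_ hb, B_res_eq begin end_ hb]
  · -- begin < 0, hence end_ < begin: both sides are the empty list
    have hba : end_ < begin := by rcases hb0 with h | h <;> omega
    have hne : ¬(begin = 1) := by omega
    have hr : PySem.List.pyRange begin (end_ + 1) 1 = [] :=
      PySem.List.pyRange_one_eq_nil (by omega)
    have hrep : (max (end_ - begin + 1) 0).toNat = 0 := by omega
    rw [hA0, hB0, hr, if_neg hne, if_neg hne, if_neg (by omega : ¬ (4:Int) ≤ end_), hrep]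
    rfl
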